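-- pv_equiv track=rewrite | github.com/JDL1994/conan_search | app.py | parse_versions
-- ===== SOURCE A (Python) =====
-- def parse_versions(result):
--     lines = result.split('\n')
--     versions = []
--     for line in lines:
--         if line.startswith("vbs/"):
--             # 提取版本号部分
--             version = line.split('/')[1].split('@')[0]
--             versions.append(version)
--     return versions
-- ===== SOURCE B (Python) =====
-- def parse_versions(result):
--     # Single left-to-right scan over the string: no split into a line list.
--     versions = []
--     i = 0
--     at_start = True
--     n = len(result)
--     while i < n:
--         if at_start and result.startswith("vbs/", i):
--             j = i + 4
--             while j < n and result[j] not in "/@\n":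
--                 j += 1
--             versions.append(result[i + 4:j])
--             i = j
--             at_start = False
--         else:
--             at_start = result[i] == "\n"
--             i += 1
--     return versions
-- ===== Notes on version B (the rewrite author's own statement) =====
-- stated objective: alternative
-- what changed: Replaces the split-into-lines pass plus a per-line double split chain by a single left-to-right character scan with a line-start flag that captures the version text after the vbs-slash prefix up to the first slash, at-sign or newline.
import Mathlib
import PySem

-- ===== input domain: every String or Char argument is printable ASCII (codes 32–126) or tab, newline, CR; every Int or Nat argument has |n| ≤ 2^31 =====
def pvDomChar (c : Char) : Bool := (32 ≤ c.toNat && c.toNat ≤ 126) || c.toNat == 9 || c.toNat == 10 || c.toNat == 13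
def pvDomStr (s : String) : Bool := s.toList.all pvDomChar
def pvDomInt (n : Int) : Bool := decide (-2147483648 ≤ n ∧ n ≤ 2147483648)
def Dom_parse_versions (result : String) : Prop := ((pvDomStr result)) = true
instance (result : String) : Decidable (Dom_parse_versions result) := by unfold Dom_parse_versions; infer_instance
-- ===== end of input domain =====

-- B replaces the split-into-lines loop by a single left-to-right scan over the characters
-- (objective: alternative — one pass, no intermediate line list).


-- ===== PORT A =====
-- s.split(sep) for a NONEMPTY literal sep: PySem.Str.split? is `some` exactly then.
def pyStrSplit (s : String) (sep : String) : List String :=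
  (PySem.Str.split? s sep).getD []

def parse_versions (result : String) : List String :=
  let lines := pyStrSplit result "\n"
  lines.foldl (fun versions line =>
    if PySem.Str.startswith line "vbs/" then
      -- line.split('/')[1]: index 1 exists because line starts with "vbs/" (so '/' occurs)
      let version := (PySem.List.pyGet? (pyStrSplit line "/") 1).getD ""
      -- .split('@')[0]: a split result is never empty, so index 0 exists
      let version := (PySem.List.pyGet? (pyStrSplit version "@") 0).getD ""
      versions ++ [version]
    else versions) []

-- ===== PORT B =====
def pvNotStop (c : Char) : Bool := !(c == '/' || c == '@' || c == '\n')

-- the while-loop of Source B: one scan with the `at_start` flag; the inner j-loop is the takeWhile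
def pvScan : List Char → Bool → List String
  | [], _ => []
  | c :: rest, atStart =>
    if atStart = true ∧ (c :: rest).take 4 = ['v', 'b', 's', '/'] then
      String.ofList ((rest.drop 3).takeWhile pvNotStop) ::
        pvScan ((rest.drop 3).dropWhile pvNotStop) false
    else
      pvScan rest (c == '\n')
termination_by cs _ => cs.length
decreasing_by
  · have h1 : ((rest.drop 3).dropWhile pvNotStop).length ≤ (rest.drop 3).length :=
      List.length_dropWhile_le _ _
    have h2 : (rest.drop 3).length ≤ rest.length := by
      simpa using List.length_drop_le 3 rest
    simp only [List.length_cons]; omega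
  · simp

def parse_versions_alt (result : String) : List String :=
  pvScan result.toList true

-- ===== PRECONDITION & SPEC =====
def Spec_parse_versions (result : String) (out : List String) : Prop := out = parse_versions_alt result
instance (result : String) (out : List String) : Decidable (Spec_parse_versions result out) := by unfold Spec_parse_versions; infer_instance

-- ===== CLAIM (what is proved, stated in full; the proofs are below) =====
def Claim_equal_parse_versions : Prop := ∀ (result : String), Dom_parse_versions result → Spec_parse_versions result (parse_versions result)

-- ===== LEMMAS AND PROOFS =====

-- simple structural splitter on one separator character (proof-side spec of Python's str.split)
def splitC (s : Char) : List Char → List (List Char)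
  | [] => [[]]
  | c :: r => if c = s then [] :: splitC s r else (splitC s r).modifyHead (c :: ·)

theorem splitC_ne_nil (s : Char) (l : List Char) : splitC s l ≠ [] := by
  induction l with
  | nil => simp [splitC]
  | cons c r ih =>
    simp only [splitC]
    split_ifs
    · simp
    · cases h : splitC s r with
      | nil => exact absurd h ih
      | cons p ps => simp

theorem splitC_head? (s : Char) (l : List Char) :
    (splitC s l).head? = some (l.takeWhile (fun c => !(c == s))) := by
  induction l with
  | nil => simp [splitC]
  | cons c r ih =>
    by_cases h : c = s
    · simp [splitC, h, List.takeWhile_cons]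
    · have hb : (c == s) = false := by simp [h]
      cases hr : splitC s r with
      | nil => exact absurd hr (splitC_ne_nil s r)
      | cons p ps =>
        rw [hr] at ih
        simp only [List.head?_cons, Option.some.injEq] at ih
        simp [splitC, h, hr, List.modifyHead, List.takeWhile_cons, hb, ih]

theorem go_eq (s : Char) (fuel : Nat) (l cur : List Char) (acc : List (List Char))
    (h : l.length + 1 ≤ fuel) :
    PySem.Chars.splitOn.go [s] fuel l cur acc
      = acc.reverse ++ (splitC s l).modifyHead (cur.reverse ++ ·) := by
  induction fuel generalizing l cur acc with
  | zero => omega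
  | succ f ih =>
    cases l with
    | nil => simp [PySem.Chars.splitOn.go, splitC]
    | cons c rest =>
      simp only [PySem.Chars.splitOn.go]
      have hlen : rest.length + 1 ≤ f := by simp at h; omega
      by_cases hcs : c = s
      · have hp : List.isPrefixOf [s] (c :: rest) = true := by simp [List.isPrefixOf, hcs]
        have hd : List.drop (List.length [s]) (c :: rest) = rest := by simp
        rw [if_pos hp, hd, ih _ _ _ hlen]
        have hid : List.modifyHead (fun x => x) (splitC s rest) = splitC s rest := by
          cases splitC s rest <;> simp [List.modifyHead]
        simp [splitC, hcs, hid]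
      · have hp : List.isPrefixOf [s] (c :: rest) = false := by
          simp [List.isPrefixOf]; exact fun hc => absurd hc.symm hcs
        rw [if_neg (by simp [hp]), ih _ _ _ hlen]
        cases hr : splitC s rest with
        | nil => exact absurd hr (splitC_ne_nil s rest)
        | cons p ps => simp [splitC, hcs, hr, List.modifyHead]

theorem splitOn_eq_splitC (s : Char) (l : List Char) :
    PySem.Chars.splitOn l [s] = splitC s l := by
  unfold PySem.Chars.splitOn
  rw [go_eq s (l.length + 1) l [] [] (le_refl _)]
  cases hr : splitC s l with
  | nil => exact absurd hr (splitC_ne_nil s l)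
  | cons p ps => simp [List.modifyHead]

theorem mem_splitC_not_mem (s : Char) (l : List Char) :
    ∀ p ∈ splitC s l, s ∉ p := by
  induction l with
  | nil => simp [splitC]
  | cons c r ih =>
    intro q hq
    simp only [splitC] at hq
    by_cases h : c = s
    · rw [if_pos h] at hq
      rcases List.mem_cons.mp hq with rfl | hq
      · simp
      · exact ih q hq
    · rw [if_neg h] at hq
      cases hr : splitC s r with
      | nil => exact absurd hr (splitC_ne_nil s r)
      | cons p ps =>
        rw [hr] at hq
        simp only [List.modifyHead] at hq
        rcases List.mem_cons.mp hq with rfl | hq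
        · intro hm
          rcases List.mem_cons.mp hm with rfl | hm
          · exact h rfl
          · exact ih p (by simp [hr]) hm
        · exact ih q (by simp [hr, hq])

-- what A computes for one line, at the char level
def lineProc (l : List Char) : List String :=
  if l.take 4 = ['v', 'b', 's', '/'] then
    [String.ofList ((l.drop 4).takeWhile pvNotStop)]
  else []

theorem pv_takeWhile_congr {p q : Char → Bool} (l : List Char)
    (h : ∀ a ∈ l, p a = q a) : l.takeWhile p = l.takeWhile q := by
  induction l with
  | nil => rfl
  | cons c r ih =>
    have hc := h c (by simp)
    by_cases hp : p c = true
    · simp [List.takeWhile_cons, hp, hc ▸ hp, ih fun a ha => h a (by simp [ha])]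
    · have : p c = false := by simpa using hp
      simp [List.takeWhile_cons, this, hc ▸ this]

theorem pv_notStop_imp (a : Char) (h : pvNotStop a = true) : (a == '\n') = false := by
  unfold pvNotStop at h
  cases h1 : (a == '\n') <;> simp_all

theorem pv_dropWhile_dropWhile (t : List Char) :
    (t.dropWhile pvNotStop).dropWhile (fun c => !(c == '\n'))
      = t.dropWhile (fun c => !(c == '\n')) := by
  induction t with
  | nil => rfl
  | cons c r ih =>
    by_cases h : pvNotStop c = true
    · have hq : (!(c == '\n')) = true := by simp [pv_notStop_imp c h]
      simp [List.dropWhile_cons, h, hq, ih]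
    · have : pvNotStop c = false := by simpa using h
      simp [List.dropWhile_cons, this]

theorem pvScan_false (cs : List Char) :
    pvScan cs false = pvScan ((cs.dropWhile (fun c => !(c == '\n'))).drop 1) true := by
  induction cs with
  | nil => simp [pvScan]
  | cons c rest ih =>
    rw [pvScan]
    rw [if_neg (by simp)]
    by_cases h : c = '\n'
    · simp [h, List.dropWhile_cons]
    · have hb : (c == '\n') = false := by simp [h]
      simp [List.dropWhile_cons, hb, ih]

theorem pv_take4_of_prefix {l cs : List Char} (hpre : l <+: cs)
    (h : l.take 4 = ['v', 'b', 's', '/']) : cs.take 4 = ['v', 'b', 's', '/'] := by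
  have h1 : l.take 4 <+: l := List.take_prefix _ _
  have h2 : l.take 4 <+: cs := h1.trans hpre
  rw [h] at h2
  have := List.prefix_iff_eq_take.mp h2
  simpa using this.symm

theorem pvScan_true (cs : List Char) :
    pvScan cs true
      = lineProc (cs.takeWhile (fun c => !(c == '\n')))
        ++ pvScan ((cs.dropWhile (fun c => !(c == '\n'))).drop 1) true := by
  by_cases h4 : cs.take 4 = ['v', 'b', 's', '/']
  · obtain ⟨t, rfl⟩ : ∃ t, cs = 'v' :: 'b' :: 's' :: '/' :: t :=
      ⟨cs.drop 4, by have h := List.take_append_drop 4 cs; rw [h4] at h; exact h.symm⟩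
    rw [pvScan, if_pos ⟨rfl, h4⟩]
    have hdrop3 : (('b' :: 's' :: '/' :: t).drop 3) = t := by simp
    rw [hdrop3, pvScan_false, pv_dropWhile_dropWhile]
    have htw : ('v' :: 'b' :: 's' :: '/' :: t).takeWhile (fun c => !(c == '\n'))
        = 'v' :: 'b' :: 's' :: '/' :: t.takeWhile (fun c => !(c == '\n')) := by
      simp [List.takeWhile_cons]
    have hdw : ('v' :: 'b' :: 's' :: '/' :: t).dropWhile (fun c => !(c == '\n'))
        = t.dropWhile (fun c => !(c == '\n')) := by
      simp [List.dropWhile_cons]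
    rw [htw, hdw]
    unfold lineProc
    rw [if_pos (by simp)]
    have hcap : (t.takeWhile (fun c => !(c == '\n'))).takeWhile pvNotStop
        = t.takeWhile pvNotStop := by
      rw [List.takeWhile_takeWhile]
      refine pv_takeWhile_congr t fun a _ => ?_
      by_cases hp : pvNotStop a = true
      · simp [hp, pv_notStop_imp a hp]
      · have hf : pvNotStop a = false := by simpa using hp
        simp [hf]
    simp [hcap]
  · cases cs with
    | nil => simp [pvScan, lineProc]
    | cons c rest =>
      rw [pvScan, if_neg (by rintro ⟨-, h⟩; exact h4 h)]
      by_cases h : c = '\n'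
      · subst h
        simp [List.takeWhile_cons, List.dropWhile_cons, lineProc]
      · have hb : (c == '\n') = false := by simp [h]
        rw [show (c == '\n') = false from hb, pvScan_false]
        have hline : lineProc ((c :: rest).takeWhile (fun c => !(c == '\n'))) = [] := by
          unfold lineProc
          rw [if_neg ?_]
          intro hc
          exact h4 (pv_take4_of_prefix (List.takeWhile_prefix _) hc)
        rw [hline]
        simp [List.dropWhile_cons, hb]

-- splitC one-step decomposition: first field, then the rest after the first separator
theorem splitC_decomp (s : Char) (cs : List Char) :
    splitC s cs
      = cs.takeWhile (fun c => !(c == s))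
        :: (if (cs.dropWhile (fun c => !(c == s))).isEmpty then []
            else splitC s ((cs.dropWhile (fun c => !(c == s))).drop 1)) := by
  induction cs with
  | nil => simp [splitC]
  | cons c r ih =>
    by_cases h : c = s
    · have hb : (!(c == s)) = false := by simp [h]
      simp [splitC, h, List.takeWhile_cons, List.dropWhile_cons, hb]
    · have hb : (!(c == s)) = true := by simp [h]
      simp only [splitC, if_neg h, ih, List.modifyHead, List.takeWhile_cons, List.dropWhile_cons, hb]
      simp

theorem pvScan_flatMap_aux (n : Nat) : ∀ cs : List Char, cs.length ≤ n →
    pvScan cs true = (splitC '\n' cs).flatMap lineProc := by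
  induction n with
  | zero =>
    intro cs h
    have : cs = [] := List.eq_nil_of_length_eq_zero (Nat.le_zero.mp h)
    subst this
    simp [pvScan, splitC, lineProc]
  | succ n ih =>
    intro cs h
    rw [pvScan_true, splitC_decomp]
    cases hd : (cs.dropWhile (fun c => !(c == '\n'))) with
    | nil => simp [hd, List.flatMap_cons, pvScan]
    | cons d ds =>
      have hlt : ds.length ≤ n := by
        have h1 : (d :: ds).length ≤ cs.length := hd ▸ List.length_dropWhile_le _ _
        simp at h1; omega
      have hne : ((d :: ds).isEmpty = true) = False := by simp
      simp only [hne, if_false, List.drop_succ_cons, List.drop_zero, List.flatMap_cons]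
      rw [ih ds hlt]

theorem pvScan_flatMap (cs : List Char) :
    pvScan cs true = (splitC '\n' cs).flatMap lineProc := by
  exact pvScan_flatMap_aux cs.length cs (le_refl _)

-- ---- A side ----

theorem pyStrSplit_eq (s : String) (sep : String) (c : Char) (hs : sep.toList = [c]) :
    pyStrSplit s sep = (splitC c s.toList).map String.ofList := by
  unfold pyStrSplit
  rw [PySem.Str.split?, hs, PySem.Chars.split?]
  simp [splitOn_eq_splitC]

theorem splitC_vbs (t : List Char) :
    splitC '/' ('v' :: 'b' :: 's' :: '/' :: t) = ['v', 'b', 's'] :: splitC '/' t := by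
  cases hr : splitC '/' t with
  | nil => exact absurd hr (splitC_ne_nil _ _)
  | cons p ps => simp [splitC, hr, List.modifyHead]

theorem pv_body_eq (acc : List String) (p : List Char) (hno : '\n' ∉ p) :
    (if PySem.Str.startswith (String.ofList p) "vbs/" then
        acc ++ [(PySem.List.pyGet? (pyStrSplit
                  ((PySem.List.pyGet? (pyStrSplit (String.ofList p) "/") 1).getD "") "@") 0).getD ""]
      else acc) = acc ++ lineProc p := by
  have hsw : PySem.Str.startswith (String.ofList p) "vbs/"
      = List.isPrefixOf ['v', 'b', 's', '/'] p := by
    rw [PySem.Str.startswith_eq, PySem.Chars.startswith]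
    simp [String.toList_ofList]
  by_cases h4 : p.take 4 = ['v', 'b', 's', '/']
  · obtain ⟨t, rfl⟩ : ∃ t, p = 'v' :: 'b' :: 's' :: '/' :: t :=
      ⟨p.drop 4, by have h := List.take_append_drop 4 p; rw [h4] at h; exact h.symm⟩
    have hpre : PySem.Str.startswith (String.ofList ('v' :: 'b' :: 's' :: '/' :: t)) "vbs/" = true := by
      rw [hsw]
      simp [List.isPrefixOf]
    rw [if_pos hpre]
    have hsplit1 : pyStrSplit (String.ofList ('v' :: 'b' :: 's' :: '/' :: t)) "/"
        = (['v', 'b', 's'] :: splitC '/' t).map String.ofList := by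
      rw [pyStrSplit_eq _ "/" '/' rfl, String.toList_ofList, splitC_vbs]
    rw [hsplit1]
    have hget1 : PySem.List.pyGet? ((['v', 'b', 's'] :: splitC '/' t).map String.ofList) 1
        = some (String.ofList (t.takeWhile (fun c => !(c == '/')))) := by
      rw [show (1 : Int) = ((1 : Nat) : Int) from rfl, PySem.List.pyGet?_natCast]
      simp only [List.map_cons, List.getElem?_cons_succ, ← List.head?_eq_getElem?]
      rw [List.head?_map, splitC_head?]
      rfl
    rw [hget1]
    simp only [Option.getD_some]
    set u := t.takeWhile (fun c => !(c == '/')) with hu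
    have hsplit2 : pyStrSplit (String.ofList u) "@" = (splitC '@' u).map String.ofList := by
      rw [pyStrSplit_eq _ "@" '@' rfl, String.toList_ofList]
    rw [hsplit2]
    have hget0 : PySem.List.pyGet? ((splitC '@' u).map String.ofList) 0
        = some (String.ofList (u.takeWhile (fun c => !(c == '@')))) := by
      rw [show (0 : Int) = ((0 : Nat) : Int) from rfl, PySem.List.pyGet?_natCast]
      simp only [← List.head?_eq_getElem?]
      rw [List.head?_map, splitC_head?]
      rfl
    rw [hget0]
    simp only [Option.getD_some]
    unfold lineProc
    rw [if_pos (by simp)]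
    have hnot : ∀ a ∈ t, (decide ((!(a == '@')) = true ∧ (!(a == '/')) = true)) = pvNotStop a := by
      intro a ha
      have hne : a ≠ '\n' := fun hc => hno (by simp [hc ▸ ha])
      unfold pvNotStop
      have : (a == '\n') = false := by simp [hne]
      cases h1 : (a == '/') <;> cases h2 : (a == '@') <;> simp [h1, h2, this]
    have : u.takeWhile (fun c => !(c == '@')) = t.takeWhile pvNotStop := by
      rw [hu, List.takeWhile_takeWhile]
      exact pv_takeWhile_congr t hnot
    rw [this]
    simp
  · have hpre : PySem.Str.startswith (String.ofList p) "vbs/" = false := by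
      rw [hsw]
      cases hb : List.isPrefixOf ['v', 'b', 's', '/'] p
      · rfl
      · exact absurd (List.prefix_iff_eq_take.mp (List.isPrefixOf_iff_prefix.mp hb)).symm
          (by simpa using h4)
    rw [if_neg (by rw [hpre]; simp)]
    unfold lineProc
    rw [if_neg h4]
    simp

theorem pv_fold_eq (l : List (List Char)) (h : ∀ p ∈ l, '\n' ∉ p) (acc : List String) :
    List.foldl (fun versions line =>
      if PySem.Str.startswith line "vbs/" then
        versions ++ [(PySem.List.pyGet? (pyStrSplit
            ((PySem.List.pyGet? (pyStrSplit line "/") 1).getD "") "@") 0).getD ""]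
      else versions) acc (l.map String.ofList)
      = acc ++ l.flatMap lineProc := by
  induction l generalizing acc with
  | nil => simp
  | cons p r ih =>
    simp only [List.map_cons, List.foldl_cons, List.flatMap_cons]
    rw [pv_body_eq acc p (h p (by simp)), ih (fun q hq => h q (by simp [hq]))]
    simp

theorem parse_versions_eq_flatMap (result : String) :
    parse_versions result = (splitC '\n' result.toList).flatMap lineProc := by
  unfold parse_versions
  rw [pyStrSplit_eq result "\n" '\n' rfl]
  rw [pv_fold_eq _ (mem_splitC_not_mem '\n' result.toList) []]
  simp [String.toList_ofList]

-- ===== VERDICT (by name: the statement is the Claim_ definition above) =====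
theorem parse_versions_spec : Claim_equal_parse_versions := by
  intro result _
  unfold Spec_parse_versions parse_versions_alt
  rw [parse_versions_eq_flatMap, ← pvScan_flatMap]
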